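-- pv_equiv track=rewrite | github.com/StrategyLogic/omen | src/omen/analysis/actor/derivation_trace.py | reasoning_order_is_valid
-- ===== SOURCE A (Python) =====
-- REASONING_ORDER: tuple[str, ...] = (
--     "seed",
--     "constraint_activation",
--     "target_or_objective",
--     "gap",
--     "required_or_warning_or_blocking",
-- )
--
-- def reasoning_order_is_valid(step_types: list[str]) -> bool:
--     order_index = {name: idx for idx, name in enumerate(REASONING_ORDER)}
--     last = -1
--     for raw in step_types:
--         name = str(raw or "").strip()
--         if name not in order_index:
--             continue
--         current = order_index[name]
--         if current < last:
--             return False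
--         last = current
--     return True
-- ===== SOURCE B (Python) =====
-- REASONING_ORDER: tuple[str, ...] = (
--     "seed",
--     "constraint_activation",
--     "target_or_objective",
--     "gap",
--     "required_or_warning_or_blocking",
-- )
--
-- def reasoning_order_is_valid(step_types: list[str]) -> bool:
--     order_index = {name: idx for idx, name in enumerate(REASONING_ORDER)}
--     indices = [order_index[name]
--                for name in (str(raw or "").strip() for raw in step_types)
--                if name in order_index]
--     return indices == sorted(indices)
-- ===== Notes on version B (the rewrite author's own statement) =====
-- stated objective: simpler
-- what changed: Replaces the running-maximum scan with early return by materializing the list of recognized order indices and checking it equals its sorted copy.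
import Mathlib
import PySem

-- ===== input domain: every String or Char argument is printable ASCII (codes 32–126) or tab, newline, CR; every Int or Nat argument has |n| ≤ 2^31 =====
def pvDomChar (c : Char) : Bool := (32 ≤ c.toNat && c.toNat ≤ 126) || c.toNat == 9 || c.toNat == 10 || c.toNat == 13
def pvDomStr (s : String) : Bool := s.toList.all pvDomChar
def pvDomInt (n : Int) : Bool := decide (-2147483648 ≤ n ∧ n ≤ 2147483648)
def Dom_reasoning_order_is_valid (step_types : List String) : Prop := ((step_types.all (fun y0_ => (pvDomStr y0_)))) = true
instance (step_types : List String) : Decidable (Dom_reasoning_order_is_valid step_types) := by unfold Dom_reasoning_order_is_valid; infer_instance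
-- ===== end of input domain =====

-- B replaces A's running-maximum scan by materializing the recognized order indices and comparing
-- the list with its sorted copy (objective: simpler).

-- ===== PORT A =====
def REASONING_ORDER : List String :=
  ["seed", "constraint_activation", "target_or_objective", "gap",
   "required_or_warning_or_blocking"]

-- order_index = {name: idx for idx, name in enumerate(REASONING_ORDER)}
def orderIndex : PySem.Dict String Int :=
  (PySem.List.enumerate REASONING_ORDER 0).foldl (fun d p => d.insert p.2 p.1) PySem.Dict.empty

-- the for-loop of A: 'last' accumulator, early return False
def pvLoopA : Int → List String → Bool
  | _, [] => true
  | last, raw :: rest =>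
    -- name = str(raw or "").strip(); on strings 'raw or ""' is raw itself when nonempty, "" otherwise
    let name := PySem.Str.strip (if raw == "" then "" else raw)
    if orderIndex.contains name then
      let current := orderIndex.getD name 0   -- order_index[name]; key is present, so getD is exact
      if current < last then false else pvLoopA current rest
    else
      pvLoopA last rest                        -- continue

def reasoning_order_is_valid (step_types : List String) : Bool :=
  pvLoopA (-1) step_types

-- ===== PORT B =====
def reasoning_order_is_valid_alt (step_types : List String) : Bool :=
  let indices := step_types.filterMap (fun raw =>
    let name := PySem.Str.strip (if raw == "" then "" else raw)
    if orderIndex.contains name then some (orderIndex.getD name 0) else none)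
  indices == PySem.List.sorted indices (fun x => x) false

-- ===== PRECONDITION & SPEC =====
def Spec_reasoning_order_is_valid (step_types : List String) (out : Bool) : Prop := out = reasoning_order_is_valid_alt step_types
instance (step_types : List String) (out : Bool) : Decidable (Spec_reasoning_order_is_valid step_types out) := by unfold Spec_reasoning_order_is_valid; infer_instance

-- ===== CLAIM (what is proved, stated in full; the proofs are below) =====
def Claim_equal_reasoning_order_is_valid : Prop := ∀ (step_types : List String), Dom_reasoning_order_is_valid step_types → Spec_reasoning_order_is_valid step_types (reasoning_order_is_valid step_types)

-- ===== LEMMAS AND PROOFS =====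

-- the recognized-index sequence both programs process
def pvIdx (step_types : List String) : List Int :=
  step_types.filterMap (fun raw =>
    let name := PySem.Str.strip (if raw == "" then "" else raw)
    if orderIndex.contains name then some (orderIndex.getD name 0) else none)

lemma orderIndex_eval : orderIndex = PySem.Dict.mk
    [("seed", 0), ("constraint_activation", 1), ("target_or_objective", 2),
     ("gap", 3), ("required_or_warning_or_blocking", 4)] := by decide

lemma orderIndex_getD_nonneg (s : String) : 0 ≤ orderIndex.getD s 0 := by
  rw [orderIndex_eval, PySem.Dict.getD_eq_get?_getD]
  simp only [PySem.Dict.get?_mk_cons]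
  split_ifs <;> simp [PySem.Dict.get?]

lemma pvIdx_cons_mem (raw : String) (rest : List String)
    (hmem : orderIndex.contains (PySem.Str.strip (if raw == "" then "" else raw)) = true) :
    pvIdx (raw :: rest) =
      orderIndex.getD (PySem.Str.strip (if raw == "" then "" else raw)) 0 :: pvIdx rest := by
  simp only [pvIdx, List.filterMap_cons, hmem, if_true]

lemma pvIdx_cons_not_mem (raw : String) (rest : List String)
    (hmem : ¬ orderIndex.contains (PySem.Str.strip (if raw == "" then "" else raw)) = true) :
    pvIdx (raw :: rest) = pvIdx rest := by
  simp only [pvIdx, List.filterMap_cons]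
  simp only [Bool.not_eq_true] at hmem
  simp only [hmem, Bool.false_eq_true, if_false]

lemma pvIdx_nonneg (st : List String) : ∀ c ∈ pvIdx st, 0 ≤ c := by
  intro c hc
  induction st with
  | nil => simp [pvIdx] at hc
  | cons raw rest ih =>
    by_cases hmem : orderIndex.contains (PySem.Str.strip (if raw == "" then "" else raw)) = true
    · rw [pvIdx_cons_mem raw rest hmem] at hc
      rcases List.mem_cons.mp hc with h | h
      · exact h ▸ orderIndex_getD_nonneg _
      · exact ih h
    · rw [pvIdx_cons_not_mem raw rest hmem] at hc
      exact ih hc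

lemma loopA_eq_chain : ∀ (xs : List String) (last : Int),
    pvLoopA last xs = true ↔ List.IsChain (· ≤ ·) (last :: pvIdx xs) := by
  intro xs
  induction xs with
  | nil => intro last; simp [pvLoopA, pvIdx]
  | cons raw rest ih =>
    intro last
    by_cases hmem : orderIndex.contains (PySem.Str.strip (if raw == "" then "" else raw)) = true
    · rw [pvIdx_cons_mem raw rest hmem, List.isChain_cons_cons]
      simp only [pvLoopA, hmem, if_true]
      by_cases hlt : orderIndex.getD (PySem.Str.strip (if raw == "" then "" else raw)) 0 < last
      · simp only [hlt, if_true]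
        constructor
        · intro h; cases h
        · rintro ⟨h1, -⟩; omega
      · simp only [hlt, if_false]
        rw [ih]
        exact ⟨fun h => ⟨by omega, h⟩, fun h => h.2⟩
    · rw [pvIdx_cons_not_mem raw rest hmem]
      simp only [pvLoopA]
      simp only [Bool.not_eq_true] at hmem
      simp only [hmem, Bool.false_eq_true, if_false]
      exact ih last

lemma chain_neg_one_iff_pairwise (l : List Int) (h0 : ∀ c ∈ l, 0 ≤ c) :
    List.IsChain (· ≤ ·) ((-1) :: l) ↔ l.Pairwise (· ≤ ·) := by
  rw [List.isChain_iff_pairwise, List.pairwise_cons]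
  exact ⟨fun h => h.2, fun h => ⟨fun b hb => by have := h0 b hb; omega, h⟩⟩

lemma eq_sorted_iff_pairwise (l : List Int) :
    (l == PySem.List.sorted l (fun x => x) false) = true ↔ l.Pairwise (· ≤ ·) := by
  rw [beq_iff_eq]
  constructor
  · intro h
    have := PySem.List.sorted_pairwise (xs := l) (key := fun x => x)
    rw [← h] at this
    exact this
  · intro h
    exact (PySem.List.sorted_eq_self_of_pairwise l (fun x => x) h).symm

-- ===== VERDICT (by name: the statement is the Claim_ definition above) =====
theorem reasoning_order_is_valid_spec : Claim_equal_reasoning_order_is_valid := by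
  intro st _
  unfold Spec_reasoning_order_is_valid reasoning_order_is_valid reasoning_order_is_valid_alt
  have halt : (st.filterMap (fun raw =>
      let name := PySem.Str.strip (if raw == "" then "" else raw)
      if orderIndex.contains name then some (orderIndex.getD name 0) else none)) = pvIdx st := rfl
  simp only [halt]
  rw [Bool.eq_iff_iff, loopA_eq_chain,
    chain_neg_one_iff_pairwise _ (pvIdx_nonneg st), ← eq_sorted_iff_pairwise]
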